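-- pv_equiv track=rewrite | github.com/inclusionAI/AWorld | aworld-cli/src/aworld_cli/status_text.py | reduce_segments
-- ===== SOURCE A (Python) =====
-- def reduce_segments(
--     segments: list[str],
--     max_width: int | None,
--     priority_labels: set[str] | None = None,
-- ) -> list[str]:
--     if max_width is None:
--         return list(segments)
--     kept = list(segments)
--     priority_labels = priority_labels or set()
--     while len(kept) > 1 and len(" | ".join(kept)) > max_width:
--         if len(kept) <= 2:
--             kept.pop()
--             continue
--         removable_index = None
--         for index in range(len(kept) - 1, -1, -1):
--             segment = kept[index]
--             label = segment.split(":", 1)[0].strip().lower()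
--             if label not in priority_labels:
--                 removable_index = index
--                 break
--         if removable_index is None:
--             removable_index = len(kept) - 1
--         kept.pop(removable_index)
--     return kept
-- ===== SOURCE B (Python) =====
-- def reduce_segments(segments, max_width, priority_labels=None):
--     if max_width is None:
--         return list(segments)
--     prio = priority_labels or set()
--     n = len(segments)
--     total = sum(len(s) for s in segments) + 3 * (n - 1)
--     if n <= 1 or total <= max_width:
--         return list(segments)
--     # one right-to-left pass with incremental width: drop non-priority segments
--     count = n
--     rest = list(segments)
--     suffix = []  # surviving segments popped from the right (rightmost first)
--     while rest and count > 2 and total > max_width: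
--         seg = rest.pop()
--         if seg.split(":", 1)[0].strip().lower() in prio:
--             suffix.append(seg)
--         else:
--             count -= 1
--             total -= len(seg) + 3
--     result = rest + suffix[::-1]
--     # still too wide: trim from the right end down to one segment
--     while len(result) > 1 and total > max_width:
--         total -= len(result.pop()) + 3
--     return result
-- ===== Notes on version B (the rewrite author's own statement) =====
-- stated objective: faster
-- what changed: Replaces the while-loop that rejoins the whole list and rescans from the right on every single pop with one incremental-width right-to-left pass dropping non-priority segments plus a final right trim, tracking the joined length arithmetically.
import Mathlib
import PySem

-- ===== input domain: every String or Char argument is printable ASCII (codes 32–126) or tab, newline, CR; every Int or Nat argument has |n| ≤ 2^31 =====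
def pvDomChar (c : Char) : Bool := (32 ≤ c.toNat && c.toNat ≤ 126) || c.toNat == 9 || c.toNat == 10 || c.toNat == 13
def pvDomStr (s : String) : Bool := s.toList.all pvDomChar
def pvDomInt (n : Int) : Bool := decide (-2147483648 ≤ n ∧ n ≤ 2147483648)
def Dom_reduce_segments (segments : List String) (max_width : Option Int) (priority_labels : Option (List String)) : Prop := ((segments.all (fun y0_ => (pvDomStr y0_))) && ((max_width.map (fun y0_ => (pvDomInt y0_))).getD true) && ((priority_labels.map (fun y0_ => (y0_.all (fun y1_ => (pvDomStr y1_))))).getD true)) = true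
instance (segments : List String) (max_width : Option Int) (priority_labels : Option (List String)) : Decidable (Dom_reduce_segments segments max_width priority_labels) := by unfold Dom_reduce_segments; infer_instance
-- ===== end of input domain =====

-- B replaces A's rejoin-and-rescan-per-pop while loop by one incremental-width right-to-left
-- pass plus a final right trim (measured faster, asymptotically O(n+L) vs O(n^2*L)).

-- ===== PORT A =====
-- label = segment.split(":", 1)[0].strip().lower()  (exact: sep ":" ≠ "" so splitMax? = some l, l ≠ [])
def pvLabel (s : String) : String :=
  PySem.Str.lower (PySem.Str.strip (((PySem.Str.splitMax? s ":" 1).getD []).headD ""))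

-- len(" | ".join(kept))
def pvJlen (l : List String) : Int := PySem.Str.len (PySem.Str.join " | " l)

-- the for-index-in-range(len(kept)-1, -1, -1) scan with break; kept.getD i "" is kept[index]
-- (index always in range at the call site, fuel = index + 1)
def pvFind (prio : List String) (kept : List String) : Nat → Option Nat
  | 0 => none
  | i + 1 =>
    if prio.contains (pvLabel (kept.getD i "")) then pvFind prio kept i
    else some i

-- kept.pop(i) for an in-range i (always in range at the call sites)
def pvPop (l : List String) (i : Nat) : List String := l.take i ++ l.drop (i + 1)

theorem pvFind_lt (prio kept : List String) : ∀ n i, pvFind prio kept n = some i → i < n := by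
  intro n
  induction n with
  | zero => intro i h; simp [pvFind] at h
  | succ m ih =>
    intro i h
    unfold pvFind at h
    split at h
    · exact Nat.lt_succ_of_lt (ih i h)
    · cases h; exact Nat.lt_succ_self m

-- the while loop of A
def pvLoopA (prio : List String) (maxw : Int) (kept : List String) : List String :=
  if h : 1 < kept.length ∧ maxw < pvJlen kept then
    if kept.length ≤ 2 then pvLoopA prio maxw kept.dropLast
    else
      let ri := (pvFind prio kept kept.length).getD (kept.length - 1)
      pvLoopA prio maxw (pvPop kept ri)
  else kept
termination_by kept.length
decreasing_by
  · rw [List.length_dropLast]; omega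
  · have hri : (pvFind prio kept kept.length).getD (kept.length - 1) < kept.length := by
      cases hf : pvFind prio kept kept.length with
      | none => simp; omega
      | some j => simpa using pvFind_lt prio kept _ j hf
    simp [pvPop, List.length_take, List.length_drop]
    omega

def reduce_segments (segments : List String) (max_width : Option Int) (priority_labels : Option (List String)) : List String :=
  match max_width with
  | none => segments
  | some maxw => pvLoopA (priority_labels.getD []) maxw segments

-- ===== PORT B =====
def pvSumLens (l : List String) : Int := (l.map PySem.Str.len).sum

-- phase 1 of Source B: pop from the end of rest (so the port recurses over rest reversed; suffix is
-- built by cons, which is exactly suffix[::-1] of Source B)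
def pvPhase1 (prio : List String) (maxw : Int) :
    List String → List String → Int → Int → List String × List String × Int × Int
  | [], suffix, total, count => ([], suffix, total, count)
  | seg :: rs, suffix, total, count =>
    if 2 < count ∧ maxw < total then
      if prio.contains (pvLabel seg) then pvPhase1 prio maxw rs (seg :: suffix) total count
      else pvPhase1 prio maxw rs suffix (total - (PySem.Str.len seg + 3)) (count - 1)
    else (seg :: rs, suffix, total, count)

-- phase 2 of Source B: pop from the end of result (the port recurses over result reversed)
def pvPhase2 (maxw : Int) : List String → Int → List String
  | [], _ => []
  | x :: rs, total =>
    if rs ≠ [] ∧ maxw < total then pvPhase2 maxw rs (total - (PySem.Str.len x + 3))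
    else x :: rs

def reduce_segments_alt (segments : List String) (max_width : Option Int) (priority_labels : Option (List String)) : List String :=
  match max_width with
  | none => segments
  | some maxw =>
    let prio := priority_labels.getD []
    let n : Int := segments.length
    let total := pvSumLens segments + 3 * (n - 1)
    if n ≤ 1 ∨ total ≤ maxw then segments
    else
      let r := pvPhase1 prio maxw segments.reverse [] total n
      (pvPhase2 maxw (r.1.reverse ++ r.2.1).reverse r.2.2.1).reverse

-- ===== PRECONDITION & SPEC =====
def Spec_reduce_segments (segments : List String) (max_width : Option Int) (priority_labels : Option (List String)) (out : List String) : Prop := out = reduce_segments_alt segments max_width priority_labels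
instance (segments : List String) (max_width : Option Int) (priority_labels : Option (List String)) (out : List String) : Decidable (Spec_reduce_segments segments max_width priority_labels out) := by unfold Spec_reduce_segments; infer_instance

-- ===== CLAIM (what is proved, stated in full; the proofs are below) =====
def Claim_equal_reduce_segments : Prop := ∀ (segments : List String) (max_width : Option Int) (priority_labels : Option (List String)), Dom_reduce_segments segments max_width priority_labels → Spec_reduce_segments segments max_width priority_labels (reduce_segments segments max_width priority_labels)

-- ===== LEMMAS AND PROOFS =====

theorem pvJlen_singleton (x : String) : pvJlen [x] = PySem.Str.len x := by
  simp [pvJlen, PySem.Str.len_eq, PySem.Str.toList_join, PySem.Chars.join_singleton]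

theorem pvJlen_cons_cons (x y : String) (t : List String) :
    pvJlen (x :: y :: t) = PySem.Str.len x + 3 + pvJlen (y :: t) := by
  simp [pvJlen, PySem.Str.len_eq, PySem.Str.toList_join, PySem.Chars.join_cons_cons]
  ring

theorem pvJlen_formula : ∀ (l : List String), l ≠ [] →
    pvJlen l = pvSumLens l + 3 * ((l.length : Int) - 1) := by
  intro l
  induction l with
  | nil => intro h; exact absurd rfl h
  | cons x t ih =>
    intro _
    cases t with
    | nil => simp [pvJlen_singleton, pvSumLens]
    | cons y t' =>
      rw [pvJlen_cons_cons, ih (by simp)]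
      simp [pvSumLens]
      ring

theorem pvJlen_remove (p q : List String) (s : String) (h : p ++ q ≠ []) :
    pvJlen (p ++ s :: q) = pvJlen (p ++ q) + PySem.Str.len s + 3 := by
  have h1 : (p ++ s :: q) ≠ [] := by simp
  have hsum : pvSumLens (p ++ s :: q) = pvSumLens (p ++ q) + PySem.Str.len s := by
    simp [pvSumLens]; ring
  have hl : ((p ++ s :: q).length : Int) = ((p ++ q).length : Int) + 1 := by
    simp
    ring
  rw [pvJlen_formula _ h1, pvJlen_formula _ h, hsum, hl]
  ring

theorem pvGetD_mid (p q : List String) (s : String) (d : String) :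
    (p ++ s :: q).getD p.length d = s := by
  simp [List.getD]

theorem pvGetD_right (p q : List String) (s : String) (d : String) (m : Nat) :
    (p ++ s :: q).getD (p.length + 1 + m) d = q.getD m d := by
  have h : p.length ≤ p.length + 1 + m := by omega
  have hidx : p.length + 1 + m - p.length = m + 1 := by omega
  simp only [List.getD, List.getElem?_append_right h, hidx, List.getElem?_cons_succ]

theorem pvGetD_mem {l : List String} {m : Nat} (h : m < l.length) (d : String) :
    l.getD m d ∈ l := by
  rw [List.getD_eq_getElem l d h]
  exact List.getElem_mem h

theorem pvFind_none (prio kept : List String)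
    (hall : ∀ s ∈ kept, prio.contains (pvLabel s) = true) :
    ∀ n, n ≤ kept.length → pvFind prio kept n = none := by
  intro n
  induction n with
  | zero => intro _; rfl
  | succ m ih =>
    intro h
    unfold pvFind
    rw [hall _ (pvGetD_mem (by omega) "")]
    exact ih (by omega)

theorem pvFind_spec (prio p q : List String) (s : String)
    (hs : prio.contains (pvLabel s) = false)
    (hq : ∀ x ∈ q, prio.contains (pvLabel x) = true) :
    ∀ m, m ≤ q.length → pvFind prio (p ++ s :: q) (p.length + 1 + m) = some p.length := by
  intro m
  induction m with
  | zero =>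
    intro _
    show pvFind prio (p ++ s :: q) (p.length + 1) = some p.length
    unfold pvFind
    rw [pvGetD_mid, hs]
    simp
  | succ k ih =>
    intro h
    have : p.length + 1 + (k + 1) = (p.length + 1 + k) + 1 := by omega
    rw [this]
    unfold pvFind
    rw [pvGetD_right]
    rw [hq _ (pvGetD_mem (by omega) "")]
    exact ih (by omega)

theorem pvPop_mid (p q : List String) (s : String) :
    pvPop (p ++ s :: q) p.length = p ++ q := by
  unfold pvPop
  have h1 : (p ++ s :: q).take p.length = p := by
    simp
  have h2 : (p ++ s :: q).drop (p.length + 1) = q := by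
    have : p ++ s :: q = (p ++ [s]) ++ q := by simp
    rw [this]
    have hl : p.length + 1 = (p ++ [s]).length := by simp
    rw [hl]
    exact List.drop_left
  rw [h1, h2]

theorem pvPop_last (l : List String) (h : l ≠ []) :
    pvPop l (l.length - 1) = l.dropLast := by
  unfold pvPop
  have hlen : 0 < l.length := List.length_pos_of_ne_nil h
  have h1 : l.length - 1 + 1 = l.length := by omega
  rw [h1, List.drop_length, List.append_nil]
  exact List.dropLast_eq_take.symm

theorem pvLoopA_tail (prio : List String) (maxw : Int) (kept : List String) :
    ∀ (total : Int), total = pvJlen kept →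
      ((∀ s ∈ kept, prio.contains (pvLabel s) = true) ∨ kept.length ≤ 2) →
      pvLoopA prio maxw kept = (pvPhase2 maxw kept.reverse total).reverse := by
  induction kept using List.reverseRecOn with
  | nil =>
    intro total _ _
    rw [pvLoopA]
    simp [pvPhase2]
  | append_singleton init x ih =>
    intro total ht hp
    have hrev : (init ++ [x]).reverse = x :: init.reverse := by simp
    by_cases hg : init ≠ [] ∧ maxw < total
    · have hlen1 : 1 < (init ++ [x]).length := by
        have := List.length_pos_of_ne_nil hg.1; simp; omega
      have hstep : pvLoopA prio maxw (init ++ [x]) = pvLoopA prio maxw init := by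
        rw [pvLoopA, dif_pos ⟨hlen1, ht ▸ hg.2⟩]
        by_cases h2 : (init ++ [x]).length ≤ 2
        · rw [if_pos h2, List.dropLast_concat]
        · rw [if_neg h2]
          have hall : ∀ s ∈ init ++ [x], prio.contains (pvLabel s) = true := by
            rcases hp with hall | hle
            · exact hall
            · exact absurd hle h2
          have hfind : pvFind prio (init ++ [x]) ((init ++ [x]).length) = none :=
            pvFind_none prio _ hall _ le_rfl
          simp only [hfind, Option.getD_none]
          rw [pvPop_last _ (by simp), List.dropLast_concat]
      have ht' : total - (PySem.Str.len x + 3) = pvJlen init := by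
        have hrm := pvJlen_remove init [] x (by simpa using hg.1)
        simp only [List.append_nil] at hrm
        rw [ht, hrm]
        ring
      have hp' : (∀ s ∈ init, prio.contains (pvLabel s) = true) ∨ init.length ≤ 2 := by
        rcases hp with hall | hle
        · exact Or.inl (fun s hs => hall s (by simp [hs]))
        · right; simp at hle; omega
      rw [hstep, ih _ ht' hp', hrev, pvPhase2,
        if_pos ⟨by simpa using hg.1, hg.2⟩]
    · have hng : ¬ (1 < (init ++ [x]).length ∧ maxw < pvJlen (init ++ [x])) := by
        rw [← ht]
        intro hcc
        refine hg ⟨?_, hcc.2⟩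
        intro hn
        rw [hn] at hcc
        simp at hcc
      have hng2 : ¬ (init.reverse ≠ [] ∧ maxw < total) := by
        intro hcc
        exact hg ⟨by simpa using hcc.1, hcc.2⟩
      rw [pvLoopA, dif_neg hng, hrev, pvPhase2, if_neg hng2]
      simp

theorem pvMain (prio : List String) (maxw : Int) :
    ∀ (revPre suf : List String) (total count : Int),
      (∀ s ∈ suf, prio.contains (pvLabel s) = true) →
      total = pvJlen (revPre.reverse ++ suf) →
      count = ((revPre.length + suf.length : Nat) : Int) →
      pvLoopA prio maxw (revPre.reverse ++ suf)
        = (pvPhase2 maxw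
            (((pvPhase1 prio maxw revPre suf total count).1.reverse
              ++ (pvPhase1 prio maxw revPre suf total count).2.1).reverse)
            (pvPhase1 prio maxw revPre suf total count).2.2.1).reverse := by
  intro revPre
  induction revPre with
  | nil =>
    intro suf total count hsuf ht _
    simp only [pvPhase1, List.reverse_nil, List.nil_append]
    exact pvLoopA_tail prio maxw suf total (by simpa using ht) (Or.inl hsuf)
  | cons seg rp ih =>
    intro suf total count hsuf ht hc
    have hlist : (seg :: rp).reverse ++ suf = rp.reverse ++ seg :: suf := by
      simp
    have hc' : count = ((rp.length + 1 + suf.length : Nat) : Int) := by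
      rw [hc]; simp only [List.length_cons]
    rw [pvPhase1]
    by_cases hg : 2 < count ∧ maxw < total
    · obtain ⟨hg1, hg2⟩ := hg
      rw [if_pos ⟨hg1, hg2⟩]
      by_cases hps : prio.contains (pvLabel seg) = true
      · rw [if_pos hps]
        have := ih (seg :: suf) total count
          (by
            intro s hs
            rcases List.mem_cons.mp hs with h | h
            · rw [h]; exact hps
            · exact hsuf s h)
          (by rwa [← hlist])
          (by rw [hc']; simp only [List.length_cons]; congr 1; omega)
        rw [hlist]
        exact this
      · rw [if_neg hps]
        have hps' : prio.contains (pvLabel seg) = false := by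
          simpa using hps
        have hlen : (rp.reverse ++ seg :: suf).length = rp.length + 1 + suf.length := by
          simp
          omega
        have hnenil : rp.reverse ++ suf ≠ [] := by
          intro hn
          have : rp.length + suf.length = 0 := by
            have := congrArg List.length hn; simpa using this
          rw [hc'] at hg1
          omega
        have ht' : total - (PySem.Str.len seg + 3) = pvJlen (rp.reverse ++ suf) := by
          have hrm := pvJlen_remove rp.reverse suf seg hnenil
          rw [← hlist] at hrm
          rw [ht, hrm]
          ring
        have hstep : pvLoopA prio maxw (rp.reverse ++ seg :: suf)
            = pvLoopA prio maxw (rp.reverse ++ suf) := by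
          have hl1 : 1 < (rp.reverse ++ seg :: suf).length := by
            rw [hlen]; rw [hc'] at hg1; omega
          rw [pvLoopA, dif_pos ⟨hl1, by rw [← hlist, ← ht]; exact hg2⟩]
          have h2 : ¬ (rp.reverse ++ seg :: suf).length ≤ 2 := by
            rw [hlen]; rw [hc'] at hg1; omega
          rw [if_neg h2]
          have hfind : pvFind prio (rp.reverse ++ seg :: suf)
              ((rp.reverse ++ seg :: suf).length) = some rp.length := by
            have hsp := pvFind_spec prio rp.reverse suf seg hps' hsuf suf.length le_rfl
            rw [List.length_reverse] at hsp
            rw [hlen]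
            exact hsp
          simp only [hfind, Option.getD_some]
          have hpop : pvPop (rp.reverse ++ seg :: suf) rp.length = rp.reverse ++ suf := by
            have := pvPop_mid rp.reverse suf seg
            rwa [List.length_reverse] at this
          rw [hpop]
        rw [hlist, hstep]
        exact ih suf (total - (PySem.Str.len seg + 3)) (count - 1) hsuf ht'
          (by rw [hc']; push_cast; omega)
    · rw [if_neg hg]
      by_cases h2 : ((seg :: rp).reverse ++ suf).length ≤ 2
      · exact pvLoopA_tail prio maxw _ total ht (Or.inr h2)
      · have hcnt : 2 < count := by
          rw [hc]
          have : 2 < (seg :: rp).length + suf.length := by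
            have := h2; simp at this ⊢; omega
          omega
        have hm : ¬ maxw < total := fun hmm => hg ⟨hcnt, hmm⟩
        have hng : ¬ (1 < ((seg :: rp).reverse ++ suf).length ∧
            maxw < pvJlen ((seg :: rp).reverse ++ suf)) := by
          rw [← ht]
          intro hcc
          exact hm hcc.2
        rw [pvLoopA, dif_neg hng]
        cases hk : ((seg :: rp).reverse ++ suf).reverse with
        | nil => simp at hk
        | cons x rest =>
          rw [pvPhase2, if_neg (fun hcc => hm hcc.2), ← hk]
          exact (List.reverse_reverse _).symm

theorem reduce_segments_spec : Claim_equal_reduce_segments := by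
  intro segments max_width priority_labels _
  unfold Spec_reduce_segments
  cases max_width with
  | none => rfl
  | some maxw =>
    simp only [reduce_segments, reduce_segments_alt]
    by_cases hc : ((segments.length : Int) ≤ 1
        ∨ pvSumLens segments + 3 * ((segments.length : Int) - 1) ≤ maxw)
    · rw [if_pos hc, pvLoopA, dif_neg]
      intro hcc
      rcases hc with h1 | h1
      · have := hcc.1
        omega
      · have hne : segments ≠ [] := by
          intro hn
          rw [hn] at hcc
          simp at hcc
        rw [pvJlen_formula segments hne] at hcc
        exact absurd hcc.2 (not_lt.mpr h1)
    · rw [if_neg hc]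
      push Not at hc
      have hne : segments ≠ [] := by
        intro hn
        rw [hn] at hc
        simp at hc
      have hmain := pvMain (priority_labels.getD []) maxw segments.reverse []
        (pvSumLens segments + 3 * ((segments.length : Int) - 1)) ((segments.length : Int))
        (by simp)
        (by simp [List.reverse_reverse, List.append_nil]
            exact (pvJlen_formula _ hne).symm)
        (by simp)
      simpa using hmain
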